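-- pv_equiv track=rewrite | github.com/abdullahYAq/network-kpi-engine | src/parsers/template_transformer.py | group_by_class
-- ===== SOURCE A (Python) =====
-- def group_by_class(flattened_list):
--     grouped_dict = {}
--     for row in flattened_list:
--         class_name = row["class_name"]
--         if class_name not in grouped_dict:
--             grouped_dict[class_name] = []
--         grouped_dict[class_name].append(row)
--     return grouped_dict
-- ===== SOURCE B (Python) =====
-- def group_by_class(flattened_list):
--     keys = dict.fromkeys(row["class_name"] for row in flattened_list)
--     return {k: [row for row in flattened_list if row["class_name"] == k]
--             for k in keys}
-- ===== Notes on version B (the rewrite author's own statement) =====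
-- stated objective: idiomatic
-- what changed: Replaces the single-pass hash-bucketing loop (create-empty-then-append per row) with a two-phase comprehension: first collect the distinct class names in first-occurrence order via dict.fromkeys, then build each group with a filtering list comprehension over the whole input.
import Mathlib
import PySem

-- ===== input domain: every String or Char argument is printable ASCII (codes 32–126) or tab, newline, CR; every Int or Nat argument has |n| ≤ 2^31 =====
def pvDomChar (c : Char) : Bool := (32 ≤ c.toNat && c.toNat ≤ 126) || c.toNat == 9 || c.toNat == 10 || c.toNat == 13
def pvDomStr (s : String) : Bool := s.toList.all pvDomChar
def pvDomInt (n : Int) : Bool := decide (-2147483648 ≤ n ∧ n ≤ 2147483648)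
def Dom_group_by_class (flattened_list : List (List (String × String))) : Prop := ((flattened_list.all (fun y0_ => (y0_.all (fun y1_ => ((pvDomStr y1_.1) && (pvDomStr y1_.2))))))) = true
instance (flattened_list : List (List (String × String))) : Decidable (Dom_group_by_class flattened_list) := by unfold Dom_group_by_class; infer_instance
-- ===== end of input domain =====

-- B builds the grouping in two phases (distinct class names in first-occurrence order via dict.fromkeys,
-- then one filtering comprehension per class name) instead of A's single-pass hash-bucketing loop.

-- row["class_name"]: first-match lookup; the "" default is never reached inside Pre_, where the key is present
def rowClass (row : List (String × String)) : String :=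
  ((PySem.Dict.mk row).get? "class_name").getD ""

-- ===== PORT A =====
def group_by_class (flattened_list : List (List (String × String))) : List (String × List (List (String × String))) :=
  (flattened_list.foldl (fun d row =>
      let c := rowClass row
      let d := if d.contains c then d else d.insert c []
      d.modify c [] (· ++ [row]))
    PySem.Dict.empty).items

-- ===== PORT B =====
def group_by_class_alt (flattened_list : List (List (String × String))) : List (String × List (List (String × String))) :=
  let keys := PySem.List.dedup (flattened_list.map rowClass)
  keys.map (fun k => (k, flattened_list.filter (fun row => rowClass row == k)))

-- ===== PRECONDITION & SPEC =====
-- Pre_ excludes exactly the inputs containing a row without a "class_name" key, on which Python A raises KeyError.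
def Pre_group_by_class (flattened_list : List (List (String × String))) : Prop :=
  (flattened_list.all (fun row => ((PySem.Dict.mk row).get? "class_name").isSome)) = true
instance (flattened_list : List (List (String × String))) : Decidable (Pre_group_by_class flattened_list) := by unfold Pre_group_by_class; infer_instance

def pvWitness_group_by_class : (List (List (String × String))) :=
  [[("class_name", "a"), ("x", "1")], [("class_name", "b")], [("class_name", "a"), ("x", "2")]]

def Spec_group_by_class (flattened_list : List (List (String × String))) (out : List (String × List (List (String × String)))) : Prop := out = group_by_class_alt flattened_list
instance (flattened_list : List (List (String × String))) (out : List (String × List (List (String × String)))) : Decidable (Spec_group_by_class flattened_list out) := by unfold Spec_group_by_class; infer_instance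

-- ===== CLAIM (what is proved, stated in full; the proofs are below) =====
def Claim_equal_group_by_class : Prop := ∀ (flattened_list : List (List (String × String))), Dom_group_by_class flattened_list → Pre_group_by_class flattened_list → Spec_group_by_class flattened_list (group_by_class flattened_list)

-- ===== LEMMAS AND PROOFS =====

-- A's loop body ('if absent, bind []; then append') is one modify with default []
lemma step_eq_modify (d : PySem.Dict String (List (List (String × String)))) (row : List (String × String)) :
    (let c := rowClass row
     let d := if d.contains c then d else d.insert c []
     d.modify c [] (· ++ [row]))
    = d.modify (rowClass row) [] (· ++ [row]) := by
  set c := rowClass row with hc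
  by_cases h : d.contains c
  · simp [h]
  · simp only [h, if_false, Bool.false_eq_true]
    simp only [PySem.Dict.modify, PySem.Dict.getD_insert_self,
      PySem.Dict.getD_of_not_contains d _ (by simpa using h)]
    apply PySem.Dict.ext
    have h' : d.contains c = false := by simpa using h
    have h'' : (d.items.any fun p => p.1 == c) = false := h'
    have hfalse : ∀ p ∈ d.items, (p.1 == c) = false :=
      fun p hp => by simpa using List.any_eq_false.mp h'' p hp
    simp only [PySem.Dict.insert, PySem.Dict.contains] at *
    simp only [h', Bool.false_eq_true, if_false]
    have hany : ((d.items ++ [(c, ([] : List (List (String × String))))]).any fun p => p.1 == c) = true := by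
      simp
    simp only [hany, if_true, List.map_append]
    rw [List.map_congr_left (g := id) (fun p hp => by simp [hfalse p hp]), List.map_id]
    simp

-- a dict with Nodup keys is its key list paired with its lookups
lemma items_eq_keys_map_getD (d : PySem.Dict String (List (List (String × String)))) (h : d.keys.Nodup) :
    d.items = d.keys.map (fun k => (k, d.getD k [])) := by
  simp only [PySem.Dict.keys, List.map_map]
  conv_lhs => rw [← List.map_id d.items]
  apply List.map_congr_left
  intro p hp
  have := PySem.Dict.getD_of_mem_items d (k := p.1) (v := p.2) (by simpa using hp) h ([])
  simp [Function.comp, this]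

lemma group_by_class_eq_alt (l : List (List (String × String))) :
    group_by_class l = group_by_class_alt l := by
  unfold group_by_class group_by_class_alt
  have hfold : (l.foldl (fun d row =>
      let c := rowClass row
      let d := if d.contains c then d else d.insert c []
      d.modify c [] (· ++ [row])) PySem.Dict.empty)
      = l.foldl (fun d row => d.modify (rowClass row) [] (· ++ [row])) PySem.Dict.empty := by
    congr 1
    funext d row
    exact step_eq_modify d row
  rw [hfold]
  set D := l.foldl (fun d row => d.modify (rowClass row) [] (· ++ [row])) PySem.Dict.empty with hD
  have hkeys : D.keys = PySem.List.dedup (l.map rowClass) := by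
    rw [hD, PySem.Dict.keys_foldl_modify_key l rowClass [] (fun _ row => (· ++ [row]))]
    simp only [pysem, PySem.Dict.keys_empty, PySem.Set.update]
    rfl
  have hnodup : D.keys.Nodup := by
    rw [hD]
    exact PySem.Dict.nodup_keys_foldl_modify_key l rowClass [] _ _ (by simp [PySem.Dict.keys_empty])
  have hgetD : ∀ c, D.getD c [] = l.filter (fun row => rowClass row == c) := by
    intro c
    have := PySem.Dict.getD_foldl_modify_append (l.map (fun r => (rowClass r, r))) (PySem.Dict.empty) c
    rw [List.foldl_map] at this
    rw [hD]
    simp only at this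
    rw [this]
    simp [PySem.Dict.getD_empty, List.filter_map, List.map_map, Function.comp_def]
  rw [items_eq_keys_map_getD D hnodup, hkeys]
  apply List.map_congr_left
  intro k _
  rw [hgetD k]

-- ===== VERDICT (by name: the statement is the Claim_ definition above) =====
theorem group_by_class_spec : Claim_equal_group_by_class := by
  intro l _ _
  unfold Spec_group_by_class
  exact group_by_class_eq_alt l
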